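-- pv_equiv track=rewrite | github.com/Jashwanth-k/Data-Structures-and-Algorithms-with-python | 1.Recorsions - 1/checkAB in string(2).py | checkAB
-- ===== SOURCE A (Python) =====
-- def checkAB(s):
--     if len(s) == 0:
--         return True
--     if s[0] == 'a':
--         if (len(s[1:])) > 1 and s[1:3] == 'bb' or 'a':
--             return checkAB(s[3:])
--         else:
--             return checkAB(s[1:])
--     else:
--         return False
-- ===== SOURCE B (Python) =====
-- def checkAB(s):
--     # Iterative stride-3 scan: A's always-truthy condition ('... or "a"') means it
--     # always recurses on s[3:], so the function just checks s[0], s[3], s[6], ... == 'a'.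
--     for i in range(0, len(s), 3):
--         if s[i] != 'a':
--             return False
--     return True
-- ===== Notes on version B (the rewrite author's own statement) =====
-- stated objective: simpler
-- what changed: Replaced the recursive slicing version (whose and/or-precedence condition is always truthy) by a plain index loop striding by 3 that checks every third character from index 0, with no slicing and no recursion.
import Mathlib
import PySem

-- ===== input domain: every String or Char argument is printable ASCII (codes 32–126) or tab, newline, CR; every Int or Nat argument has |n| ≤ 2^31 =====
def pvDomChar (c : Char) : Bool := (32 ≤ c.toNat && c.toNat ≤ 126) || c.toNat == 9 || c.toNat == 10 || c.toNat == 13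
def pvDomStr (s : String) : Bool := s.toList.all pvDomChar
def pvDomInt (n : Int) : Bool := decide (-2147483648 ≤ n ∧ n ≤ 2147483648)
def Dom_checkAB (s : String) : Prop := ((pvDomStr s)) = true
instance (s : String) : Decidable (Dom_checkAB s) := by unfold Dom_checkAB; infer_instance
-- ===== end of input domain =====

-- B replaces A's recursive slicing check (whose always-truthy 'and/or' condition makes it
-- test s[0], s[3], s[6], ...) by a plain iterative loop over indices 0, 3, 6, ... — simpler.


-- ===== PORT A =====
-- literal transliteration of A on the character list: s[1:] = rest, s[1:3] = rest.take 2,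
-- s[3:] = (rest).drop 2; the Python condition `x and y or 'a'` is truthy whenever the
-- `or 'a'` arm is reached, ported as `(… && …) || true`.
def checkABRec : List Char → Bool
  | [] => true
  | c :: rest =>
    if c = 'a' then
      if (decide (rest.length > 1) && decide (rest.take 2 = ['b', 'b'])) || true then
        checkABRec (rest.drop 2)
      else
        checkABRec rest
    else
      false
termination_by l => l.length
decreasing_by
  all_goals simp only [List.length_drop, List.length_cons]; omega

def checkAB (s : String) : Bool := checkABRec s.toList

-- ===== PORT B =====
-- for i in range(0, len(s), 3): if s[i] != 'a': return False / return True
-- (i is always in range, so pyGetD's default is never used)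
def checkAB_alt (s : String) : Bool :=
  (PySem.List.pyRange 0 (s.toList.length : Int) 3).all
    (fun i => PySem.List.pyGetD s.toList i 'a' == 'a')

-- ===== PRECONDITION & SPEC =====
def Spec_checkAB (s : String) (out : Bool) : Prop := out = checkAB_alt s
instance (s : String) (out : Bool) : Decidable (Spec_checkAB s out) := by unfold Spec_checkAB; infer_instance

-- ===== CLAIM (what is proved, stated in full; the proofs are below) =====
def Claim_equal_checkAB : Prop := ∀ (s : String), Dom_checkAB s → Spec_checkAB s (checkAB s)

-- ===== LEMMAS AND PROOFS =====

-- the common abstraction: every third character from index 0 is 'a'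
def strideAll : List Char → Bool
  | [] => true
  | c :: rest => (c == 'a') && strideAll (rest.drop 2)
termination_by l => l.length
decreasing_by simp only [List.length_drop, List.length_cons]; omega

lemma checkABRec_eq_strideAll (l : List Char) : checkABRec l = strideAll l := by
  induction l using checkABRec.induct
  all_goals simp only [checkABRec, strideAll]
  all_goals simp_all

lemma alt_eq_strideAll (l : List Char) :
    (PySem.List.pyRange 0 (l.length : Int) 3).all
      (fun i => PySem.List.pyGetD l i 'a' == 'a') = strideAll l := by
  induction l using strideAll.induct with
  | case1 =>
    simp [PySem.List.pyRange_of_pos 0 0 (show (0:Int) < 3 by norm_num), strideAll]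
  | case2 c rest ih =>
    rw [strideAll.eq_def]
    simp only []
    rw [PySem.List.pyRange_of_pos 0 _ (by norm_num)] at ih ⊢
    have hcnt : (if (0:Int) < ((c :: rest).length : Int)
        then ((((c :: rest).length : Int) - 0 + 3 - 1) / 3).toNat else 0)
        = (if (0:Int) < (((rest.drop 2).length : Int))
        then (((((rest.drop 2).length : Int)) - 0 + 3 - 1) / 3).toNat else 0) + 1 := by
      simp only [List.length_cons, List.length_drop]
      split_ifs with h1 h2 <;> push_cast <;> omega
    rw [hcnt, List.range_succ_eq_map]
    simp only [List.map_cons, List.map_map, List.all_cons, List.all_map] at ih ⊢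
    have h0 : PySem.List.pyGetD (c :: rest) (0 + 3 * ((0:Nat):Int)) 'a' = c := by
      simp
    have hshift : ∀ k : Nat,
        PySem.List.pyGetD (c :: rest) (0 + 3 * (((k + 1 : Nat)):Int)) 'a'
          = PySem.List.pyGetD (rest.drop 2) (0 + 3 * ((k:Nat):Int)) 'a' := by
      intro k
      have e1 : (0 + 3 * (((k + 1 : Nat)):Int)) = (((3 * k + 3 : Nat)):Int) := by push_cast; ring
      have e2 : (0 + 3 * ((k:Nat):Int)) = (((3 * k : Nat)):Int) := by push_cast; ring
      rw [e1, e2, PySem.List.pyGetD_natCast, PySem.List.pyGetD_natCast]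
      show (c :: rest).getD (3 * k + 3) 'a' = (rest.drop 2).getD (3 * k) 'a'
      simp only [List.getD, List.getElem?_drop]
      have e3 : 3 * k + 3 = (2 + 3 * k) + 1 := by omega
      rw [e3, List.getElem?_cons_succ]
    rw [h0]
    simp only [Function.comp_def] at ih ⊢
    simp only [Nat.succ_eq_add_one, hshift]
    rw [ih]

-- ===== VERDICT (by name: the statement is the Claim_ definition above) =====
theorem checkAB_spec : Claim_equal_checkAB := by
  intro s _
  unfold Spec_checkAB checkAB checkAB_alt
  rw [checkABRec_eq_strideAll, alt_eq_strideAll]
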